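-- pv_equiv track=rewrite | github.com/infornet1/odoo-dev | addons/ueipab_ai_agent/models/ai_agent_conversation.py | _detect_attachment_type
-- ===== SOURCE A (Python) =====
-- def _detect_attachment_type(url):
--     """Detect attachment type from URL file extension."""
--     if not url:
--         return None
--     url_lower = url.lower().split('?')[0]
--     if any(url_lower.endswith(ext) for ext in ('.jpg', '.jpeg', '.png', '.gif', '.webp')):
--         return 'image'
--     if any(url_lower.endswith(ext) for ext in ('.pdf', '.doc', '.docx')):
--         return 'document'
--     if any(url_lower.endswith(ext) for ext in ('.mp3', '.ogg', '.opus', '.m4a', '.aac', '.wav')):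
--         return 'audio'
--     if any(url_lower.endswith(ext) for ext in ('.mp4', '.mov', '.avi', '.3gp')):
--         return 'video'
--     return 'image'  # Default for MassivaMóvil (most common)
-- ===== SOURCE B (Python) =====
-- _EXTENSION_TYPES = {
--     '.jpg': 'image', '.jpeg': 'image', '.png': 'image', '.gif': 'image', '.webp': 'image',
--     '.pdf': 'document', '.doc': 'document', '.docx': 'document',
--     '.mp3': 'audio', '.ogg': 'audio', '.opus': 'audio', '.m4a': 'audio', '.aac': 'audio', '.wav': 'audio',
--     '.mp4': 'video', '.mov': 'video', '.avi': 'video', '.3gp': 'video',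
-- }
--
--
-- def _trailing_ext(s):
--     """The suffix of s from its last '.', or '' if s has no dot."""
--     return s[s.rfind('.'):] if s.rfind('.') != -1 else ''
--
--
-- def _detect_attachment_type(url):
--     """Detect attachment type from URL file extension (single dict lookup)."""
--     if not url:
--         return None
--     url_lower = url.lower().split('?')[0]
--     return _EXTENSION_TYPES.get(_trailing_ext(url_lower), 'image')
-- ===== Notes on version B (the rewrite author's own statement) =====
-- stated objective: idiomatic
-- what changed: Replaced the four endswith-chains over 18 extensions by a single extension-to-type dict plus one rfind-based trailing-extension extraction, so classification is one dict lookup with default 'image'.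
import Mathlib
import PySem

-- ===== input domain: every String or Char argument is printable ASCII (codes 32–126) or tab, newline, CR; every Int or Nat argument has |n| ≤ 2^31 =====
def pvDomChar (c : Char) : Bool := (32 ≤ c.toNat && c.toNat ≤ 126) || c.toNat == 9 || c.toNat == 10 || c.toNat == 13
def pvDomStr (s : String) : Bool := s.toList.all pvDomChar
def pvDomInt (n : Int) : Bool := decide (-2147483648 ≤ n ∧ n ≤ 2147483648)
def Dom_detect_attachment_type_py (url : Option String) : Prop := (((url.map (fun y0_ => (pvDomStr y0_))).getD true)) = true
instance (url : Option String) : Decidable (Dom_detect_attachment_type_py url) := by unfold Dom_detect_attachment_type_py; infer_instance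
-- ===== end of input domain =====

-- B replaces A's four endswith-chains by one extension→type dict and a single rfind-based
-- trailing-extension extraction; objective: simpler/more idiomatic, same behaviour.

-- ===== PORT A =====
def detect_attachment_type_py (url : Option String) : Option String :=
  match url with
  | none => none
  | some u =>
    if u = "" then none
    else
      let url_lower := PySem.List.pyGetD ((PySem.Str.split? (PySem.Str.lower u) "?").getD []) 0 ""
      if [".jpg", ".jpeg", ".png", ".gif", ".webp"].any (fun ext => PySem.Str.endswith url_lower ext) then some "image"
      else if [".pdf", ".doc", ".docx"].any (fun ext => PySem.Str.endswith url_lower ext) then some "document"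
      else if [".mp3", ".ogg", ".opus", ".m4a", ".aac", ".wav"].any (fun ext => PySem.Str.endswith url_lower ext) then some "audio"
      else if [".mp4", ".mov", ".avi", ".3gp"].any (fun ext => PySem.Str.endswith url_lower ext) then some "video"
      else some "image"

-- ===== PORT B =====
def pvExtTypes : PySem.Dict String String :=
  PySem.Dict.ofList
    [(".jpg", "image"), (".jpeg", "image"), (".png", "image"), (".gif", "image"), (".webp", "image"),
     (".pdf", "document"), (".doc", "document"), (".docx", "document"),
     (".mp3", "audio"), (".ogg", "audio"), (".opus", "audio"), (".m4a", "audio"), (".aac", "audio"), (".wav", "audio"),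
     (".mp4", "video"), (".mov", "video"), (".avi", "video"), (".3gp", "video")]

-- helper `_trailing_ext` of Source B: the suffix from the last '.', or '' if there is no dot
def pvTrailingExt (s : String) : String :=
  if PySem.Str.rfind s "." ≠ -1 then PySem.Str.slice s (some (PySem.Str.rfind s ".")) none else ""

def detect_attachment_type_py_alt (url : Option String) : Option String :=
  match url with
  | none => none
  | some u =>
    if u = "" then none
    else
      let url_lower := PySem.List.pyGetD ((PySem.Str.split? (PySem.Str.lower u) "?").getD []) 0 ""
      some (PySem.Dict.getD pvExtTypes (pvTrailingExt url_lower) "image")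

-- ===== PRECONDITION & SPEC =====
def Spec_detect_attachment_type_py (url : Option String) (out : Option String) : Prop := out = detect_attachment_type_py_alt url
instance (url : Option String) (out : Option String) : Decidable (Spec_detect_attachment_type_py url out) := by unfold Spec_detect_attachment_type_py; infer_instance

-- ===== CLAIM (what is proved, stated in full; the proofs are below) =====
def Claim_equal_detect_attachment_type_py : Prop := ∀ (url : Option String), Dom_detect_attachment_type_py url → Spec_detect_attachment_type_py url (detect_attachment_type_py url)

-- ===== LEMMAS AND PROOFS =====

lemma pv_dot_not_prefix {s : List Char} (h : '.' ∉ s) : ¬ (['.'].isPrefixOf s = true) := by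
  rw [List.isPrefixOf_iff_prefix]
  exact fun hp => h (hp.subset (by simp))

lemma pv_go_append (u tl : List Char) (htl : '.' ∉ tl) :
    ∀ k : Nat, u.length ≤ k → PySem.Chars.rfind.go (u ++ '.' :: tl) ['.'] k = u.length := by
  intro k
  induction k with
  | zero =>
    intro hk
    have hu : u = [] := List.length_eq_zero_iff.mp (Nat.le_zero.mp hk)
    subst hu
    simp [PySem.Chars.rfind.go, List.isPrefixOf]
  | succ j ih =>
    intro hk
    by_cases hj : u.length = j + 1
    · have hdrop : (u ++ '.' :: tl).drop (j + 1) = '.' :: tl := by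
        rw [← hj]; simp
      simp [PySem.Chars.rfind.go, hdrop, List.isPrefixOf, hj]
    · have hle : u.length ≤ j := by omega
      have hdrop : (u ++ '.' :: tl).drop (j + 1) = tl.drop (j - u.length) := by
        rw [List.drop_append]
        have h1 : (u.drop (j + 1)) = ([] : List Char) := by
          apply List.drop_eq_nil_of_le; omega
        have h2 : j + 1 - u.length = (j - u.length) + 1 := by omega
        simp [h1, h2]
      have hnp : ¬ (['.'].isPrefixOf ((u ++ '.' :: tl).drop (j + 1)) = true) := by
        rw [hdrop]
        exact pv_dot_not_prefix (fun hm => htl (List.mem_of_mem_drop hm))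
      simp only [PySem.Chars.rfind.go]
      rw [if_neg hnp]
      exact ih hle

lemma pv_rfind_of_suffix (t u tl : List Char) (htl : '.' ∉ tl) (ht : t = u ++ '.' :: tl) :
    PySem.Chars.rfind t ['.'] = (u.length : Int) := by
  subst ht
  unfold PySem.Chars.rfind
  exact pv_go_append u tl htl _ (by simp)

-- if t ends with e = '.'::tl (tl dot-free), the trailing extension of t is exactly e
lemma pv_ext_of_endswith (t e : String) (tl : List Char) (he : e.toList = '.' :: tl)
    (htl : '.' ∉ tl) (h : PySem.Chars.endswith t.toList ('.' :: tl) = true) :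
    pvTrailingExt t = e := by
  rw [PySem.Chars.endswith_iff] at h
  obtain ⟨u, hu⟩ := h
  have hrf : PySem.Str.rfind t "." = (u.length : Int) := by
    rw [PySem.Str.rfind_eq]
    exact pv_rfind_of_suffix t.toList u tl htl (by rw [← hu])
  have hne : (u.length : Int) ≠ -1 := by omega
  apply String.toList_inj.mp
  unfold pvTrailingExt
  simp only [hrf, if_pos hne, PySem.Str.toList_slice, PySem.Chars.slice_eq_listSlice]
  rw [PySem.List.slice_from_natCast, ← hu, he]
  simp

-- the trailing extension is a suffix of t, so it cannot equal a nonempty e that t does not end with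
lemma pv_ext_ne (t e : String) (hnil : e ≠ "") (h : PySem.Chars.endswith t.toList e.toList = false) :
    pvTrailingExt t ≠ e := by
  intro heq
  unfold pvTrailingExt at heq
  split at heq
  · have hsuf : e.toList <:+ t.toList := by
      rw [← heq]
      simp only [PySem.Str.toList_slice, PySem.Chars.slice_eq_listSlice,
        PySem.List.slice_some_none]
      exact List.drop_suffix _ _
    rw [(PySem.Chars.endswith_iff _ _).mpr hsuf] at h
    exact absurd h (by simp)
  · exact hnil heq.symm

-- if t ends with key e of type ty, the dict lookup returns ty
lemma pv_getD_of_endswith (t e ty : String) (tl : List Char) (he : e.toList = '.' :: tl)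
    (htl : '.' ∉ tl) (hty : PySem.Dict.getD pvExtTypes e "image" = ty)
    (h : PySem.Chars.endswith t.toList ('.' :: tl) = true) :
    PySem.Dict.getD pvExtTypes (pvTrailingExt t) "image" = ty := by
  rw [pv_ext_of_endswith t e tl he htl h]; exact hty

lemma pv_classify (t : String) :
    (if [".jpg", ".jpeg", ".png", ".gif", ".webp"].any (fun ext => PySem.Str.endswith t ext) then some "image"
     else if [".pdf", ".doc", ".docx"].any (fun ext => PySem.Str.endswith t ext) then some "document"
     else if [".mp3", ".ogg", ".opus", ".m4a", ".aac", ".wav"].any (fun ext => PySem.Str.endswith t ext) then some "audio"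
     else if [".mp4", ".mov", ".avi", ".3gp"].any (fun ext => PySem.Str.endswith t ext) then some "video"
     else some "image")
    = some (PySem.Dict.getD pvExtTypes (pvTrailingExt t) "image") := by
  by_cases h1 : PySem.Chars.endswith t.toList ['.', 'j', 'p', 'g'] = true
  · simp [h1, pv_getD_of_endswith t ".jpg" "image" ['j', 'p', 'g'] rfl (by decide) rfl h1]
  by_cases h2 : PySem.Chars.endswith t.toList ['.', 'j', 'p', 'e', 'g'] = true
  · simp [h1, h2, pv_getD_of_endswith t ".jpeg" "image" ['j', 'p', 'e', 'g'] rfl (by decide) rfl h2]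
  by_cases h3 : PySem.Chars.endswith t.toList ['.', 'p', 'n', 'g'] = true
  · simp [h1, h2, h3, pv_getD_of_endswith t ".png" "image" ['p', 'n', 'g'] rfl (by decide) rfl h3]
  by_cases h4 : PySem.Chars.endswith t.toList ['.', 'g', 'i', 'f'] = true
  · simp [h1, h2, h3, h4, pv_getD_of_endswith t ".gif" "image" ['g', 'i', 'f'] rfl (by decide) rfl h4]
  by_cases h5 : PySem.Chars.endswith t.toList ['.', 'w', 'e', 'b', 'p'] = true
  · simp [h1, h2, h3, h4, h5, pv_getD_of_endswith t ".webp" "image" ['w', 'e', 'b', 'p'] rfl (by decide) rfl h5]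
  by_cases h6 : PySem.Chars.endswith t.toList ['.', 'p', 'd', 'f'] = true
  · simp [h1, h2, h3, h4, h5, h6, pv_getD_of_endswith t ".pdf" "document" ['p', 'd', 'f'] rfl (by decide) rfl h6]
  by_cases h7 : PySem.Chars.endswith t.toList ['.', 'd', 'o', 'c'] = true
  · simp [h1, h2, h3, h4, h5, h6, h7, pv_getD_of_endswith t ".doc" "document" ['d', 'o', 'c'] rfl (by decide) rfl h7]
  by_cases h8 : PySem.Chars.endswith t.toList ['.', 'd', 'o', 'c', 'x'] = true
  · simp [h1, h2, h3, h4, h5, h6, h7, h8, pv_getD_of_endswith t ".docx" "document" ['d', 'o', 'c', 'x'] rfl (by decide) rfl h8]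
  by_cases h9 : PySem.Chars.endswith t.toList ['.', 'm', 'p', '3'] = true
  · simp [h1, h2, h3, h4, h5, h6, h7, h8, h9, pv_getD_of_endswith t ".mp3" "audio" ['m', 'p', '3'] rfl (by decide) rfl h9]
  by_cases h10 : PySem.Chars.endswith t.toList ['.', 'o', 'g', 'g'] = true
  · simp [h1, h2, h3, h4, h5, h6, h7, h8, h9, h10, pv_getD_of_endswith t ".ogg" "audio" ['o', 'g', 'g'] rfl (by decide) rfl h10]
  by_cases h11 : PySem.Chars.endswith t.toList ['.', 'o', 'p', 'u', 's'] = true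
  · simp [h1, h2, h3, h4, h5, h6, h7, h8, h9, h10, h11, pv_getD_of_endswith t ".opus" "audio" ['o', 'p', 'u', 's'] rfl (by decide) rfl h11]
  by_cases h12 : PySem.Chars.endswith t.toList ['.', 'm', '4', 'a'] = true
  · simp [h1, h2, h3, h4, h5, h6, h7, h8, h9, h10, h11, h12, pv_getD_of_endswith t ".m4a" "audio" ['m', '4', 'a'] rfl (by decide) rfl h12]
  by_cases h13 : PySem.Chars.endswith t.toList ['.', 'a', 'a', 'c'] = true
  · simp [h1, h2, h3, h4, h5, h6, h7, h8, h9, h10, h11, h12, h13, pv_getD_of_endswith t ".aac" "audio" ['a', 'a', 'c'] rfl (by decide) rfl h13]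
  by_cases h14 : PySem.Chars.endswith t.toList ['.', 'w', 'a', 'v'] = true
  · simp [h1, h2, h3, h4, h5, h6, h7, h8, h9, h10, h11, h12, h13, h14, pv_getD_of_endswith t ".wav" "audio" ['w', 'a', 'v'] rfl (by decide) rfl h14]
  by_cases h15 : PySem.Chars.endswith t.toList ['.', 'm', 'p', '4'] = true
  · simp [h1, h2, h3, h4, h5, h6, h7, h8, h9, h10, h11, h12, h13, h14, h15, pv_getD_of_endswith t ".mp4" "video" ['m', 'p', '4'] rfl (by decide) rfl h15]
  by_cases h16 : PySem.Chars.endswith t.toList ['.', 'm', 'o', 'v'] = true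
  · simp [h1, h2, h3, h4, h5, h6, h7, h8, h9, h10, h11, h12, h13, h14, h15, h16, pv_getD_of_endswith t ".mov" "video" ['m', 'o', 'v'] rfl (by decide) rfl h16]
  by_cases h17 : PySem.Chars.endswith t.toList ['.', 'a', 'v', 'i'] = true
  · simp [h1, h2, h3, h4, h5, h6, h7, h8, h9, h10, h11, h12, h13, h14, h15, h16, h17, pv_getD_of_endswith t ".avi" "video" ['a', 'v', 'i'] rfl (by decide) rfl h17]
  by_cases h18 : PySem.Chars.endswith t.toList ['.', '3', 'g', 'p'] = true
  · simp [h1, h2, h3, h4, h5, h6, h7, h8, h9, h10, h11, h12, h13, h14, h15, h16, h17, h18, pv_getD_of_endswith t ".3gp" "video" ['3', 'g', 'p'] rfl (by decide) rfl h18]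
  simp only [Bool.not_eq_true] at h1 h2 h3 h4 h5 h6 h7 h8 h9 h10 h11 h12 h13 h14 h15 h16 h17 h18
  have n1 := pv_ext_ne t ".jpg" (by decide) h1
  have n2 := pv_ext_ne t ".jpeg" (by decide) h2
  have n3 := pv_ext_ne t ".png" (by decide) h3
  have n4 := pv_ext_ne t ".gif" (by decide) h4
  have n5 := pv_ext_ne t ".webp" (by decide) h5
  have n6 := pv_ext_ne t ".pdf" (by decide) h6
  have n7 := pv_ext_ne t ".doc" (by decide) h7
  have n8 := pv_ext_ne t ".docx" (by decide) h8
  have n9 := pv_ext_ne t ".mp3" (by decide) h9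
  have n10 := pv_ext_ne t ".ogg" (by decide) h10
  have n11 := pv_ext_ne t ".opus" (by decide) h11
  have n12 := pv_ext_ne t ".m4a" (by decide) h12
  have n13 := pv_ext_ne t ".aac" (by decide) h13
  have n14 := pv_ext_ne t ".wav" (by decide) h14
  have n15 := pv_ext_ne t ".mp4" (by decide) h15
  have n16 := pv_ext_ne t ".mov" (by decide) h16
  have n17 := pv_ext_ne t ".avi" (by decide) h17
  have n18 := pv_ext_ne t ".3gp" (by decide) h18
  rw [show pvExtTypes = PySem.Dict.mk [(".jpg", "image"), (".jpeg", "image"), (".png", "image"), (".gif", "image"), (".webp", "image"), (".pdf", "document"), (".doc", "document"), (".docx", "document"), (".mp3", "audio"), (".ogg", "audio"), (".opus", "audio"), (".m4a", "audio"), (".aac", "audio"), (".wav", "audio"), (".mp4", "video"), (".mov", "video"), (".avi", "video"), (".3gp", "video")] from rfl]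
  simp [h1, h2, h3, h4, h5, h6, h7, h8, h9, h10, h11, h12, h13, h14, h15, h16, h17, h18,
    PySem.Dict.getD, PySem.Dict.get?, beq_iff_eq,
    Ne.symm n1, Ne.symm n2, Ne.symm n3, Ne.symm n4, Ne.symm n5, Ne.symm n6, Ne.symm n7, Ne.symm n8, Ne.symm n9, Ne.symm n10, Ne.symm n11, Ne.symm n12, Ne.symm n13, Ne.symm n14, Ne.symm n15, Ne.symm n16, Ne.symm n17, Ne.symm n18]

-- ===== VERDICT (by name: the statement is the Claim_ definition above) =====
theorem detect_attachment_type_py_spec : Claim_equal_detect_attachment_type_py := by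
  intro url _
  unfold Spec_detect_attachment_type_py
  cases url with
  | none => rfl
  | some u =>
    simp only [detect_attachment_type_py, detect_attachment_type_py_alt]
    by_cases hu : u = ""
    · simp [hu]
    · simp only [if_neg hu]
      exact pv_classify _
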